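-- pv_equiv track=rewrite | github.com/saaz181/path_finder | main.py | all_targets_found
-- ===== SOURCE A (Python) =====
-- def all_targets_found(path, targets, initial_position):
--     x, y = initial_position  # Initialize current position with the initial position
--     targets_found = []  # List to store positions where targets are found during the path traversal
--
--     # Iterate through each move in the path
--     for move in path:
--         # Update the current position based on the move
--         if move == 'R':
--             y += 1
--         elif move == 'L':
--             y -= 1
--         elif move == 'U':
--             x -= 1
--         elif move == 'D':
--             x += 1
--
--         current_position = (x, y)  # Calculate the current position after the move
--
--         # Check if the current position contains a target
--         if current_position in targets:
--             targets_found.append(current_position)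
--
--     # Check if all targets have been found by comparing sets of found targets and the original targets
--     return set(targets) == set(targets_found)
-- ===== SOURCE B (Python) =====
-- def all_targets_found(path, targets, initial_position):
--     moves = {'R': (0, 1), 'L': (0, -1), 'U': (-1, 0), 'D': (1, 0)}
--     x, y = initial_position
--     traj = []
--     for c in path:
--         dx, dy = moves.get(c, (0, 0))
--         x += dx
--         y += dy
--         traj.append((x, y))
--     traj.sort()
--     i = 0
--     for t in sorted(targets):
--         while i < len(traj) and traj[i] < t:
--             i += 1
--         if i == len(traj) or traj[i] != t:
--             return False
--     return True
-- ===== Notes on version B (the rewrite author's own statement) =====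
-- stated objective: alternative
-- what changed: B replaces A's per-move membership filter plus set-equality with a sort-then-merge algorithm: it builds the trajectory via a move->delta lookup table, sorts trajectory and targets, and decides coverage with a single two-pointer merge scan (no sets at all).
import Mathlib
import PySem

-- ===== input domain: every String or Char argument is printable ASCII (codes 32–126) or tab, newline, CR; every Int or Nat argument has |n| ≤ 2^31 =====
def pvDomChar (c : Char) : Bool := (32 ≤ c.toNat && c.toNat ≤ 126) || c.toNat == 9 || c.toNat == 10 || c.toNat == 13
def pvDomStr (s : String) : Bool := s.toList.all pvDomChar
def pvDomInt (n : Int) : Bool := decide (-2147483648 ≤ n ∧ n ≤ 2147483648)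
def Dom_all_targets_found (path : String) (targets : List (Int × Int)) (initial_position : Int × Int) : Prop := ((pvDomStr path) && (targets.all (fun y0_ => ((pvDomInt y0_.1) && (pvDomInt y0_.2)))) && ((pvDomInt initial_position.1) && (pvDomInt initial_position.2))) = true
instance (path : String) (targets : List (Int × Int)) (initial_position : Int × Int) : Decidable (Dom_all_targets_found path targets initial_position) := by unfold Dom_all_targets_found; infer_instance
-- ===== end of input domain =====

-- B replaces A's in-loop target filter + set-equality with a delta-table walk, sorting, and a two-pointer merge subset check (alternative algorithm, same result).


-- ===== PORT A =====
-- loop state: (current position, targets_found list); membership test and append inside the loop, set-equality at the end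
def all_targets_found (path : String) (targets : List (Int × Int)) (initial_position : Int × Int) : Bool :=
  let st := path.toList.foldl
    (fun (st : (Int × Int) × List (Int × Int)) (move : Char) =>
      let p :=
        if move = 'R' then (st.1.1, st.1.2 + 1)
        else if move = 'L' then (st.1.1, st.1.2 - 1)
        else if move = 'U' then (st.1.1 - 1, st.1.2)
        else if move = 'D' then (st.1.1 + 1, st.1.2)
        else st.1
      if p ∈ targets then (p, st.2 ++ [p]) else (p, st.2))
    (initial_position, [])
  PySem.Set.equal (PySem.Set.ofList targets) (PySem.Set.ofList st.2)

-- ===== PORT B =====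
-- Python's tuple comparison (p < q) on pairs of ints
def pvBlt (p q : Int × Int) : Bool :=
  decide (p.1 < q.1) || (!decide (q.1 < p.1) && decide (p.2 < q.2))

-- the inner 'while i < len(traj) and traj[i] < t: i += 1'
def pvAdvance (traj : List (Int × Int)) (t : Int × Int) (i : Nat) : Nat :=
  if h : i < traj.length then
    if pvBlt traj[i] t then pvAdvance traj t (i + 1) else i
  else i
termination_by traj.length - i
decreasing_by omega

-- one step of the merge scan: advance past smaller trajectory entries, then demand a match
def pvMergeStep (T : List (Int × Int)) (acc : Option Nat) (t : Int × Int) : Option Nat :=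
  match acc with
  | none => none
  | some i =>
    let i' := pvAdvance T t i
    if h : i' < T.length then
      if T[i'] = t then some i' else none
    else none

-- delta-table walk building the trajectory, sort both lists, two-pointer merge scan
def all_targets_found_alt (path : String) (targets : List (Int × Int)) (initial_position : Int × Int) : Bool :=
  let moves : PySem.Dict Char (Int × Int) :=
    PySem.Dict.ofList [('R', ((0 : Int), (1 : Int))), ('L', (0, -1)), ('U', (-1, 0)), ('D', (1, 0))]
  let st := path.toList.foldl
    (fun (st : (Int × Int) × List (Int × Int)) (c : Char) =>
      let d := PySem.Dict.getD moves c (0, 0)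
      let p := (st.1.1 + d.1, st.1.2 + d.2)
      (p, st.2 ++ [p]))
    (initial_position, [])
  let straj := PySem.List.sorted2 st.2 (fun p => p.1) (fun p => p.2) false
  let need := PySem.List.sorted2 targets (fun p => p.1) (fun p => p.2) false
  let res := need.foldl (pvMergeStep straj) (some 0)
  res.isSome

-- ===== PRECONDITION & SPEC =====
def Spec_all_targets_found (path : String) (targets : List (Int × Int)) (initial_position : Int × Int) (out : Bool) : Prop := out = all_targets_found_alt path targets initial_position
instance (path : String) (targets : List (Int × Int)) (initial_position : Int × Int) (out : Bool) : Decidable (Spec_all_targets_found path targets initial_position out) := by unfold Spec_all_targets_found; infer_instance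

-- ===== CLAIM (what is proved, stated in full; the proofs are below) =====
def Claim_equal_all_targets_found : Prop := ∀ (path : String) (targets : List (Int × Int)) (initial_position : Int × Int), Dom_all_targets_found path targets initial_position → Spec_all_targets_found path targets initial_position (all_targets_found path targets initial_position)

-- ===== LEMMAS AND PROOFS =====

-- the position after one move (both loops compute exactly this)
def pvStep (p : Int × Int) (move : Char) : Int × Int :=
  if move = 'R' then (p.1, p.2 + 1)
  else if move = 'L' then (p.1, p.2 - 1)
  else if move = 'U' then (p.1 - 1, p.2)
  else if move = 'D' then (p.1 + 1, p.2)
  else p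

-- the positions reached after each move (initial position excluded)
def pvTraj : List Char → (Int × Int) → List (Int × Int)
  | [], _ => []
  | c :: ms, p => pvStep p c :: pvTraj ms (pvStep p c)

theorem pvFoldA (targets : List (Int × Int)) :
    ∀ (ms : List Char) (p : Int × Int) (acc : List (Int × Int)),
      ms.foldl
        (fun (st : (Int × Int) × List (Int × Int)) (move : Char) =>
          let p :=
            if move = 'R' then (st.1.1, st.1.2 + 1)
            else if move = 'L' then (st.1.1, st.1.2 - 1)
            else if move = 'U' then (st.1.1 - 1, st.1.2)
            else if move = 'D' then (st.1.1 + 1, st.1.2)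
            else st.1
          if p ∈ targets then (p, st.2 ++ [p]) else (p, st.2))
        (p, acc)
      = (ms.foldl pvStep p, acc ++ (pvTraj ms p).filter (fun q => decide (q ∈ targets))) := by
  intro ms
  induction ms with
  | nil => intro p acc; simp [pvTraj]
  | cons c ms ih =>
    intro p acc
    have hstep : pvStep p c =
        (if c = 'R' then (p.1, p.2 + 1)
         else if c = 'L' then (p.1, p.2 - 1)
         else if c = 'U' then (p.1 - 1, p.2)
         else if c = 'D' then (p.1 + 1, p.2)
         else p) := rfl
    simp only [List.foldl_cons, pvTraj, List.filter_cons, ← hstep]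
    by_cases h : pvStep p c ∈ targets
    · rw [if_pos h, ih]; simp [h]
    · rw [if_neg h, ih]; simp [h]

-- the delta-table lookup computes the same step
theorem pvStepD (p : Int × Int) (c : Char) :
    (p.1 + (PySem.Dict.getD (PySem.Dict.ofList [('R', ((0 : Int), (1 : Int))), ('L', (0, -1)), ('U', (-1, 0)), ('D', (1, 0))]) c (0, 0)).1,
     p.2 + (PySem.Dict.getD (PySem.Dict.ofList [('R', ((0 : Int), (1 : Int))), ('L', (0, -1)), ('U', (-1, 0)), ('D', (1, 0))]) c (0, 0)).2)
    = pvStep p c := by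
  by_cases h1 : c = 'R'
  · subst h1
    rw [show PySem.Dict.getD (PySem.Dict.ofList [('R', ((0 : Int), (1 : Int))), ('L', (0, -1)), ('U', (-1, 0)), ('D', (1, 0))]) 'R' (0, 0) = (0, 1) from by decide]
    simp [pvStep]
  · by_cases h2 : c = 'L'
    · subst h2
      rw [show PySem.Dict.getD (PySem.Dict.ofList [('R', ((0 : Int), (1 : Int))), ('L', (0, -1)), ('U', (-1, 0)), ('D', (1, 0))]) 'L' (0, 0) = (0, -1) from by decide]
      simp [pvStep, h1]
      rfl
    · by_cases h3 : c = 'U'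
      · subst h3
        rw [show PySem.Dict.getD (PySem.Dict.ofList [('R', ((0 : Int), (1 : Int))), ('L', (0, -1)), ('U', (-1, 0)), ('D', (1, 0))]) 'U' (0, 0) = (-1, 0) from by decide]
        simp [pvStep, h1, h2]
        rfl
      · by_cases h4 : c = 'D'
        · subst h4
          rw [show PySem.Dict.getD (PySem.Dict.ofList [('R', ((0 : Int), (1 : Int))), ('L', (0, -1)), ('U', (-1, 0)), ('D', (1, 0))]) 'D' (0, 0) = (1, 0) from by decide]
          simp [pvStep, h1, h2, h3]
        · have b1 : ('R' == c) = false := by simp; exact fun e => h1 e.symm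
          have b2 : ('L' == c) = false := by simp; exact fun e => h2 e.symm
          have b3 : ('U' == c) = false := by simp; exact fun e => h3 e.symm
          have b4 : ('D' == c) = false := by simp; exact fun e => h4 e.symm
          simp [PySem.Dict.getD, PySem.Dict.get?, PySem.Dict.ofList, PySem.Dict.empty,
            PySem.Dict.insert, PySem.Dict.update, List.find?, b1, b2, b3, b4, pvStep, h1, h2, h3, h4]

theorem pvFoldBsimple :
    ∀ (ms : List Char) (p : Int × Int) (acc : List (Int × Int)),
      ms.foldl (fun (st : (Int × Int) × List (Int × Int)) c => (pvStep st.1 c, st.2 ++ [pvStep st.1 c])) (p, acc)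
      = (ms.foldl pvStep p, acc ++ pvTraj ms p) := by
  intro ms
  induction ms with
  | nil => intro p acc; simp [pvTraj]
  | cons c ms ih =>
    intro p acc
    simp only [List.foldl_cons, pvTraj]
    rw [ih]
    simp

theorem pvFoldB :
    ∀ (ms : List Char) (p : Int × Int) (acc : List (Int × Int)),
      ms.foldl
        (fun (st : (Int × Int) × List (Int × Int)) (c : Char) =>
          let d := PySem.Dict.getD (PySem.Dict.ofList [('R', ((0 : Int), (1 : Int))), ('L', (0, -1)), ('U', (-1, 0)), ('D', (1, 0))]) c (0, 0)
          let p := (st.1.1 + d.1, st.1.2 + d.2)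
          (p, st.2 ++ [p]))
        (p, acc)
      = (ms.foldl pvStep p, acc ++ pvTraj ms p) := by
  have hfun : (fun (st : (Int × Int) × List (Int × Int)) (c : Char) =>
      let d := PySem.Dict.getD (PySem.Dict.ofList [('R', ((0 : Int), (1 : Int))), ('L', (0, -1)), ('U', (-1, 0)), ('D', (1, 0))]) c (0, 0)
      let p := (st.1.1 + d.1, st.1.2 + d.2)
      (p, st.2 ++ [p]))
      = (fun (st : (Int × Int) × List (Int × Int)) c => (pvStep st.1 c, st.2 ++ [pvStep st.1 c])) := by
    funext st c
    simp only [pvStepD]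
  intro ms p acc
  rw [hfun, pvFoldBsimple]

-- basic order facts about Python's tuple '<'
theorem pvBlt_irrefl (a : Int × Int) : pvBlt a a = false := by
  obtain ⟨a1, a2⟩ := a; simp [pvBlt]

theorem pvBlt_asymm {a b : Int × Int} (h : pvBlt a b = true) : pvBlt b a = false := by
  obtain ⟨a1, a2⟩ := a; obtain ⟨b1, b2⟩ := b
  simp [pvBlt] at h ⊢; omega

theorem pvBlt_lt_of_lt_of_le {a b c : Int × Int} (h1 : pvBlt a b = true) (h2 : pvBlt c b = false) :
    pvBlt a c = true := by
  obtain ⟨a1, a2⟩ := a; obtain ⟨b1, b2⟩ := b; obtain ⟨c1, c2⟩ := c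
  simp [pvBlt] at h1 h2 ⊢; omega

theorem pvBlt_antisymm {a b : Int × Int} (h1 : pvBlt a b = false) (h2 : pvBlt b a = false) : a = b := by
  obtain ⟨a1, a2⟩ := a; obtain ⟨b1, b2⟩ := b
  simp [pvBlt] at h1 h2; refine Prod.ext ?_ ?_ <;> simp <;> omega

-- insertBy with Python's tuple '<' preserves sortedness
theorem pvInsertBy_pairwise {x : Int × Int} {ys : List (Int × Int)}
    (h : ys.Pairwise (fun a b => pvBlt b a = false)) :
    (PySem.List.insertBy pvBlt x ys).Pairwise (fun a b => pvBlt b a = false) := by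
  induction ys with
  | nil => simp [PySem.List.insertBy]
  | cons y ys ih =>
    rw [List.pairwise_cons] at h
    by_cases hb : pvBlt x y = true
    · show (PySem.List.insertBy pvBlt x (y :: ys)).Pairwise _
      rw [show PySem.List.insertBy pvBlt x (y :: ys) = x :: y :: ys by
        simp [PySem.List.insertBy, hb]]
      refine List.pairwise_cons.2 ⟨?_, List.pairwise_cons.2 ⟨h.1, h.2⟩⟩
      intro z hz
      rcases List.mem_cons.1 hz with rfl | hz'
      · exact pvBlt_asymm hb
      · exact pvBlt_asymm (pvBlt_lt_of_lt_of_le hb (h.1 z hz'))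
    · rw [show PySem.List.insertBy pvBlt x (y :: ys) = y :: PySem.List.insertBy pvBlt x ys by
        simp [PySem.List.insertBy, hb]]
      refine List.pairwise_cons.2 ⟨?_, ih h.2⟩
      intro z hz
      rcases (PySem.List.insertBy_mem_iff pvBlt x z ys).1 hz with rfl | hz'
      · exact eq_false_of_ne_true hb
      · exact h.1 z hz'

-- sorted2 with the projection keys is the insertBy fold with Python's tuple '<'
theorem pvSorted2_eq (xs : List (Int × Int)) :
    PySem.List.sorted2 xs (fun p => p.1) (fun p => p.2) false
      = xs.foldl (fun acc x => PySem.List.insertBy pvBlt x acc) [] := rfl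

theorem pvSorted2_pairwise (xs : List (Int × Int)) :
    (PySem.List.sorted2 xs (fun p => p.1) (fun p => p.2) false).Pairwise
      (fun a b => pvBlt b a = false) := by
  rw [pvSorted2_eq]
  suffices h : ∀ (l : List (Int × Int)) (acc : List (Int × Int)),
      acc.Pairwise (fun a b => pvBlt b a = false) →
      (l.foldl (fun acc x => PySem.List.insertBy pvBlt x acc) acc).Pairwise
        (fun a b => pvBlt b a = false) from h xs [] (by simp)
  intro l
  induction l with
  | nil => intro acc h; simpa using h
  | cons x l ih => intro acc h; exact ih _ (pvInsertBy_pairwise h)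

-- specification of the while loop: skipped entries are < t, the stop entry is not < t
theorem pvAdvance_spec (T : List (Int × Int)) (t : Int × Int) :
    ∀ (fuel i : Nat), T.length - i ≤ fuel → i ≤ T.length →
      i ≤ pvAdvance T t i ∧ pvAdvance T t i ≤ T.length ∧
      (∀ j (hj : j < T.length), i ≤ j → j < pvAdvance T t i → pvBlt T[j] t = true) ∧
      (∀ h : pvAdvance T t i < T.length, pvBlt T[pvAdvance T t i] t = false) := by
  intro fuel
  induction fuel with
  | zero =>
    intro i hf hi
    have hieq : i = T.length := by omega
    rw [pvAdvance, dif_neg (by omega)]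
    exact ⟨le_refl _, hi, fun j hj h1 h2 => absurd h2 (by omega), fun h => absurd h (by omega)⟩
  | succ fuel ih =>
    intro i hf hi
    rw [pvAdvance]
    by_cases hl : i < T.length
    · rw [dif_pos hl]
      by_cases hb : pvBlt T[i] t = true
      · rw [if_pos hb]
        have := ih (i + 1) (by omega) (by omega)
        refine ⟨by omega, this.2.1, ?_, this.2.2.2⟩
        intro j hj h1 h2
        by_cases hji : j = i
        · subst hji; exact hb
        · exact this.2.2.1 j hj (by omega) h2
      · rw [if_neg (by simpa using hb)]
        refine ⟨le_refl _, hi, fun j hj h1 h2 => absurd h2 (by omega), ?_⟩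
        intro h
        simpa using hb
    · rw [dif_neg hl]
      exact ⟨le_refl _, hi, fun j hj h1 h2 => absurd h2 (by omega), fun h => absurd h hl⟩

-- the two reduction equations of the merge step
theorem pvMergeStep_none (T : List (Int × Int)) (t : Int × Int) :
    pvMergeStep T none t = none := rfl

theorem pvMergeStep_some (T : List (Int × Int)) (i : Nat) (t : Int × Int) :
    pvMergeStep T (some i) t
      = if h : pvAdvance T t i < T.length then
          (if T[pvAdvance T t i]'h = t then some (pvAdvance T t i) else none)
        else none := rfl

-- once the merge state is none, it stays none
theorem pvFoldNone (T : List (Int × Int)) (N : List (Int × Int)) :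
    N.foldl (pvMergeStep T) none = none := by
  induction N with
  | nil => rfl
  | cons t N ih => rw [List.foldl_cons, pvMergeStep_none]; exact ih

-- the merge scan over sorted lists decides list containment
theorem pvCov (T : List (Int × Int)) (hT : T.Pairwise (fun a b => pvBlt b a = false)) :
    ∀ (N : List (Int × Int)), N.Pairwise (fun a b => pvBlt b a = false) →
    ∀ i, i ≤ T.length →
    (∀ j (hj : j < T.length), j < i → ∀ t ∈ N, pvBlt T[j] t = true) →
    (N.foldl (pvMergeStep T) (some i)).isSome = decide (∀ t ∈ N, t ∈ T) := by
  intro N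
  induction N with
  | nil => intro _ i _ _; simp
  | cons t N ih =>
    intro hN i hi hinv
    rw [List.pairwise_cons] at hN
    obtain ⟨hle, hlen, hskip, hstop⟩ := pvAdvance_spec T t T.length i (by omega) hi
    have hbefore : ∀ j (hj : j < T.length), j < pvAdvance T t i → pvBlt T[j] t = true := by
      intro j hj hji'
      by_cases hjlt : j < i
      · exact hinv j hj hjlt t (by simp)
      · exact hskip j hj (by omega) hji'
    rw [List.foldl_cons, pvMergeStep_some]
    by_cases hlt : pvAdvance T t i < T.length
    · rw [dif_pos hlt]
      by_cases heq : T[pvAdvance T t i]'hlt = t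
      · have hmem : t ∈ T := heq ▸ List.getElem_mem hlt
        rw [if_pos heq, ih hN.2 (pvAdvance T t i) (by omega) ?inv]
        · simp [hmem]
        case inv =>
          intro j hj hji' u hu
          exact pvBlt_lt_of_lt_of_le (hbefore j hj hji') (hN.1 u hu)
      · -- t is not in T: the scan stopped at an entry ≥ t that is ≠ t
        have hnm : t ∉ T := by
          intro hmem
          obtain ⟨j, hj, hje⟩ := List.mem_iff_getElem.1 hmem
          rcases lt_trichotomy j (pvAdvance T t i) with hji | hji | hji
          · have h' := hbefore j hj hji
            rw [hje, pvBlt_irrefl] at h'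
            exact absurd h' (by simp)
          · subst hji; exact heq hje
          · have hp := List.pairwise_iff_getElem.1 hT (pvAdvance T t i) j hlt hj hji
            exact heq (pvBlt_antisymm (hstop hlt) (hje ▸ hp))
        rw [if_neg heq, pvFoldNone]
        simp [hnm]
    · -- scan ran off the end: everything in T is < t, so t ∉ T
      have hnm : t ∉ T := by
        intro hmem
        obtain ⟨j, hj, hje⟩ := List.mem_iff_getElem.1 hmem
        have h' := hbefore j hj (by omega)
        rw [hje, pvBlt_irrefl] at h'
        exact absurd h' (by simp)
      rw [dif_neg hlt, pvFoldNone]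
      simp [hnm]

theorem pvMemSorted2 (xs : List (Int × Int)) (x : Int × Int) :
    x ∈ PySem.List.sorted2 xs (fun p => p.1) (fun p => p.2) false ↔ x ∈ xs :=
  (PySem.List.sorted2_perm xs (fun p => p.1) (fun p => p.2) false).mem_iff

-- ===== VERDICT (by name: the statement is the Claim_ definition above) =====
theorem all_targets_found_spec : Claim_equal_all_targets_found := by
  intro path targets initial_position _
  unfold Spec_all_targets_found all_targets_found all_targets_found_alt
  simp only [pvFoldA, pvFoldB, List.nil_append]
  rw [pvCov _ (pvSorted2_pairwise (pvTraj path.toList initial_position)) _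
        (pvSorted2_pairwise targets) 0 (by omega) (by intro j hj h; omega)]
  rw [Bool.eq_iff_iff, PySem.Set.equal_iff]
  simp only [PySem.Set.mem_ofList, List.mem_filter, decide_eq_true_eq, pvMemSorted2]
  constructor
  · intro h t ht
    exact ((h t).mp ht).1
  · intro h t
    exact ⟨fun hx => ⟨h t hx, hx⟩, fun hx => hx.2⟩
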